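-- pv_equiv track=rewrite | github.com/Lh-Liang/LeetCodePro | 3704.count-no-zero-pairs-that-sum-to-n.py | countNoZeroPairs
-- ===== SOURCE A (Python) =====
-- def countNoZeroPairs(n: int) -> int:
--     s_n = str(n)[::-1]
--     L = len(s_n)
--
--     # Memoization dictionary
--     memo = {}
--
--     def dp(idx, carry, a_done, b_done):
--         # Base case: processed all digits of n
--         if idx == L:
--             # Valid if no carry left, and both numbers have finished forming
--             return 1 if carry == 0 and a_done and b_done else 0
--
--         state = (idx, carry, a_done, b_done)
--         if state in memo:
--             return memo[state]
--
--         res = 0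
--         target = int(s_n[idx])
--
--         # Try both possible next_carry values (0 or 1)
--         for next_carry in (0, 1):
--             # We need: d_a + d_b + carry = target + 10 * next_carry
--             # So: d_a + d_b = target + 10 * next_carry - carry
--             S = target + 10 * next_carry - carry
--
--             # Case 1: Both a and b have already finished
--             if a_done and b_done:
--                 # d_a = 0, d_b = 0 implies sum must be 0
--                 if S == 0:
--                     res += dp(idx + 1, next_carry, True, True)
--
--             # Case 2: a finished, b still active
--             elif a_done and not b_done:
--                 # d_a = 0. We need d_b = S. d_b must be in [1, 9]
--                 if 1 <= S <= 9:
--                     # Option A: b finishes at this digit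
--                     res += dp(idx + 1, next_carry, True, True)
--                     # Option B: b continues
--                     res += dp(idx + 1, next_carry, True, False)
--
--             # Case 3: b finished, a active
--             elif not a_done and b_done:
--                 # d_b = 0. We need d_a = S. d_a must be in [1, 9]
--                 if 1 <= S <= 9:
--                     # Option A: a finishes at this digit
--                     res += dp(idx + 1, next_carry, True, True)
--                     # Option B: a continues
--                     res += dp(idx + 1, next_carry, False, True)
--
--             # Case 4: Both active
--             else:
--                 # We need d_a + d_b = S where d_a, d_b in [1, 9]
--                 # Count pairs (x, y) such that x + y = S, 1 <= x, y <= 9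
--                 # Range for x: max(1, S-9) <= x <= min(9, S-1)
--                 low = max(1, S - 9)
--                 high = min(9, S - 1)
--
--                 if low <= high:
--                     count = high - low + 1
--                     # For each valid pair, we have 4 branching possibilities for the "done" states
--                     # 1. Both finish
--                     w1 = dp(idx + 1, next_carry, True, True)
--                     # 2. a finishes, b continues
--                     w2 = dp(idx + 1, next_carry, True, False)
--                     # 3. a continues, b finishes
--                     w3 = dp(idx + 1, next_carry, False, True)
--                     # 4. Both continue
--                     w4 = dp(idx + 1, next_carry, False, False)
--
--                     res += count * (w1 + w2 + w3 + w4)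
--
--         memo[state] = res
--         return res
--
--     # Initial call: index 0, carry 0, neither a nor b finished
--     # Since a, b must be positive, they can't be finished at start.
--     return dp(0, 0, False, False)
-- ===== SOURCE B (Python) =====
-- def countNoZeroPairs(n: int) -> int:
--     # Bottom-up tabulation over digit positions (least-significant first),
--     # replacing A's memoized top-down recursion.
--     s = str(n)[::-1]
--     L = len(s)
--     # layer[(carry, a_done, b_done)] = number of ways to finish from position idx
--     # (initially idx = L, the base layer).
--     layer = {(c, a, b): 1 if (c, a, b) == (0, True, True) else 0
--              for c in (0, 1) for a in (False, True) for b in (False, True)}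
--     for idx in range(L - 1, -1, -1):
--         t = int(s[idx])
--         new = {}
--         for carry in (0, 1):
--             for a_done in (False, True):
--                 for b_done in (False, True):
--                     res = 0
--                     for nc in (0, 1):
--                         S = t + 10 * nc - carry
--                         if a_done and b_done:
--                             if S == 0:
--                                 res += layer[(nc, True, True)]
--                         elif a_done:
--                             if 1 <= S <= 9:
--                                 res += layer[(nc, True, True)] + layer[(nc, True, False)]
--                         elif b_done:
--                             if 1 <= S <= 9:
--                                 res += layer[(nc, True, True)] + layer[(nc, False, True)]
--                         else:
--                             low = max(1, S - 9)
--                             high = min(9, S - 1)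
--                             if low <= high:
--                                 res += (high - low + 1) * (layer[(nc, True, True)]
--                                                           + layer[(nc, True, False)]
--                                                           + layer[(nc, False, True)]
--                                                           + layer[(nc, False, False)])
--                     new[(carry, a_done, b_done)] = res
--         layer = new
--     return layer[(0, False, False)]
-- ===== Notes on version B (the rewrite author's own statement) =====
-- stated objective: alternative
-- what changed: Replaced A's memoized top-down recursion (dict keyed by the digit index and state) with an explicit bottom-up tabulation: a layer holding every (carry, a_done, b_done) state is rolled from the last digit position to the first using the same transitions.
import Mathlib
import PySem

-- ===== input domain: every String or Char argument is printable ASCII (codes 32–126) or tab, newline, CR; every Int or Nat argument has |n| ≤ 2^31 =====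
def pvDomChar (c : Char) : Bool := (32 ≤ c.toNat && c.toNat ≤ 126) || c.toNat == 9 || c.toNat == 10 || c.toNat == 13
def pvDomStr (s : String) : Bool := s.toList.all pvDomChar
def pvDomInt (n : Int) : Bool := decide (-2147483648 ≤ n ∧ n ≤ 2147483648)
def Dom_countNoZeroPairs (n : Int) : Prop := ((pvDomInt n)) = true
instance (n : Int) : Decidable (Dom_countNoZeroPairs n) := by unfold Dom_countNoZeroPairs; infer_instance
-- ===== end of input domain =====

-- B replaces A's memoized top-down recursion by a bottom-up tabulation over digit
-- positions with the same transitions; same return value, no speed claim.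

-- ===== PORT A =====
-- A's memo dict, keyed by the state tuple (idx, carry, a_done, b_done).
def pvMemo : Type := PySem.Dict (Int × Int × Bool × Bool) Int

-- one `next_carry` iteration of A's `for next_carry in (0, 1)` loop body, with the
-- memo threaded through the sequenced recursive calls (`go` is A's `dp` on idx+1)
def pvMemoBranch (go : Int → Bool → Bool → pvMemo → Int × pvMemo)
    (S : Int) (nc : Int) (aD bD : Bool) (m : pvMemo) : Int × pvMemo :=
  if aD && bD then
    if S = 0 then go nc true true m else (0, m)
  else if aD && !bD then
    if 1 ≤ S ∧ S ≤ 9 then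
      let p1 := go nc true true m
      let p2 := go nc true false p1.2
      (p1.1 + p2.1, p2.2)
    else (0, m)
  else if !aD && bD then
    if 1 ≤ S ∧ S ≤ 9 then
      let p1 := go nc true true m
      let p2 := go nc false true p1.2
      (p1.1 + p2.1, p2.2)
    else (0, m)
  else
    let low := max 1 (S - 9)
    let high := min 9 (S - 1)
    if low ≤ high then
      let p1 := go nc true true m
      let p2 := go nc true false p1.2
      let p3 := go nc false true p2.2
      let p4 := go nc false false p3.2
      ((high - low + 1) * (p1.1 + p2.1 + p3.1 + p4.1), p4.2)
    else (0, m)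

-- A's dp: `idx` advances through s_n, carried here as the remaining suffix `rest`
-- (idx == L ⟺ rest = []); the mutable memo dict is threaded explicitly.
-- `int(s_n[idx])` is PySem.Int.ofChars?; its None (ValueError, '-' for n < 0) is
-- outside Pre_, so the `.getD 0` default is never reached on admitted inputs.
def pvDpA : List Char → Int → Int → Bool → Bool → pvMemo → Int × pvMemo
  | [], _, carry, aD, bD, memo =>
      ((if carry = 0 ∧ aD = true ∧ bD = true then 1 else 0), memo)
  | ch :: rs, idx, carry, aD, bD, memo =>
      match memo.get? (idx, carry, aD, bD) with
      | some v => (v, memo)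
      | none =>
        let target := (PySem.Int.ofChars? [ch]).getD 0
        let go := fun (c : Int) (a b : Bool) (m : pvMemo) => pvDpA rs (idx + 1) c a b m
        let p0 := pvMemoBranch go (target + 10 * 0 - carry) 0 aD bD memo
        let p1 := pvMemoBranch go (target + 10 * 1 - carry) 1 aD bD p0.2
        let res := 0 + p0.1 + p1.1
        (res, p1.2.insert (idx, carry, aD, bD) res)

def countNoZeroPairs (n : Int) : Int :=
  let s_n := (PySem.Int.toChars n).reverse
  (pvDpA s_n 0 0 false false PySem.Dict.empty).1

-- ===== PORT B =====
-- B's layer dict has the 8 fixed keys (carry, a_done, b_done); it is ported as a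
-- function on those keys.  pvCell is the body of B's innermost `for nc in (0, 1)`.
def pvCell (t : Int) (next : Int → Bool → Bool → Int)
    (carry : Int) (aD bD : Bool) (nc : Int) : Int :=
  let S := t + 10 * nc - carry
  if aD && bD then
    if S = 0 then next nc true true else 0
  else if aD then
    if 1 ≤ S ∧ S ≤ 9 then next nc true true + next nc true false else 0
  else if bD then
    if 1 ≤ S ∧ S ≤ 9 then next nc true true + next nc false true else 0
  else
    let low := max 1 (S - 9)
    let high := min 9 (S - 1)
    if low ≤ high then
      (high - low + 1) *
        (next nc true true + next nc true false + next nc false true + next nc false false)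
    else 0

-- one entry of the new layer: `res` accumulated over nc = 0, 1
def pvStep (t : Int) (next : Int → Bool → Bool → Int)
    (carry : Int) (aD bD : Bool) : Int :=
  pvCell t next carry aD bD 0 + pvCell t next carry aD bD 1

-- the base layer at idx = L: 1 only at (carry = 0, a_done, b_done)
def pvBase (carry : Int) (aD bD : Bool) : Int :=
  if carry = 0 ∧ aD = true ∧ bD = true then 1 else 0

def countNoZeroPairs_alt (n : Int) : Int :=
  let s := (PySem.Int.toChars n).reverse
  -- `for idx in range(L-1, -1, -1)` builds the layer for idx from the one for idx+1:
  -- a right fold over the reversed digit string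
  let final := s.foldr
    (fun ch layer => pvStep ((PySem.Int.ofChars? [ch]).getD 0) layer) pvBase
  final 0 false false

-- ===== PRECONDITION & SPEC =====
-- Pre_ excludes n < 0: there str(n) contains '-', on which A's int(s_n[idx]) raises
-- ValueError (B raises on the same inputs).
def Pre_countNoZeroPairs (n : Int) : Prop := 0 ≤ n
instance (n : Int) : Decidable (Pre_countNoZeroPairs n) := by unfold Pre_countNoZeroPairs; infer_instance

def pvWitness_countNoZeroPairs : Int := 11

def Spec_countNoZeroPairs (n : Int) (out : Int) : Prop := out = countNoZeroPairs_alt n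
instance (n : Int) (out : Int) : Decidable (Spec_countNoZeroPairs n out) := by unfold Spec_countNoZeroPairs; infer_instance

-- ===== CLAIM (what is proved, stated in full; the proofs are below) =====
def Claim_equal_countNoZeroPairs : Prop := ∀ (n : Int), Dom_countNoZeroPairs n → Pre_countNoZeroPairs n → Spec_countNoZeroPairs n (countNoZeroPairs n)

-- ===== LEMMAS AND PROOFS =====

-- the pure value of A's dp on a digit suffix (no memo); cons case is exactly B's step
def pvDpP : List Char → Int → Bool → Bool → Int
  | [] => pvBase
  | ch :: rs => pvStep ((PySem.Int.ofChars? [ch]).getD 0) (pvDpP rs)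

-- the pure value of one nc-block of A, as a function of S
def pvPBranch (gp : Int → Bool → Bool → Int) (S : Int) (nc : Int) (aD bD : Bool) : Int :=
  if aD && bD then
    if S = 0 then gp nc true true else 0
  else if aD && !bD then
    if 1 ≤ S ∧ S ≤ 9 then gp nc true true + gp nc true false else 0
  else if !aD && bD then
    if 1 ≤ S ∧ S ≤ 9 then gp nc true true + gp nc false true else 0
  else
    let low := max 1 (S - 9)
    let high := min 9 (S - 1)
    if low ≤ high then
      (high - low + 1) * (gp nc true true + gp nc true false + gp nc false true + gp nc false false)
    else 0

-- B's cell (elif chain on a_done alone) computes A's branch value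
lemma pvCell_eq_pBranch (t : Int) (next : Int → Bool → Bool → Int)
    (carry : Int) (aD bD : Bool) (nc : Int) :
    pvCell t next carry aD bD nc = pvPBranch next (t + 10 * nc - carry) nc aD bD := by
  cases aD <;> cases bD <;> rfl

-- memo correctness invariant: every stored value is the pure dp value of its suffix
def pvGoodM (s : List Char) (m : pvMemo) : Prop :=
  ∀ j c a b v, m.get? (j, c, a, b) = some v → v = pvDpP (s.drop j.toNat) c a b

lemma pvMemoBranch_ok (s : List Char)
    (go : Int → Bool → Bool → pvMemo → Int × pvMemo) (gp : Int → Bool → Bool → Int)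
    (hgo : ∀ c a b m, pvGoodM s m →
      (go c a b m).1 = gp c a b ∧ pvGoodM s (go c a b m).2)
    (S nc : Int) (aD bD : Bool) (m : pvMemo) (hm : pvGoodM s m) :
    (pvMemoBranch go S nc aD bD m).1 = pvPBranch gp S nc aD bD ∧
      pvGoodM s (pvMemoBranch go S nc aD bD m).2 := by
  unfold pvMemoBranch pvPBranch
  cases aD <;> cases bD <;>
    simp only [Bool.and_self, Bool.and_true, Bool.and_false, Bool.not_true, Bool.not_false, Bool.false_eq_true, reduceIte]
  · -- both active
    split_ifs with h
    · obtain ⟨e1, g1⟩ := hgo nc true true m hm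
      obtain ⟨e2, g2⟩ := hgo nc true false _ g1
      obtain ⟨e3, g3⟩ := hgo nc false true _ g2
      obtain ⟨e4, g4⟩ := hgo nc false false _ g3
      exact ⟨by rw [e1, e2, e3, e4], g4⟩
    · exact ⟨rfl, hm⟩
  · -- b finished, a active
    split_ifs with h
    · obtain ⟨e1, g1⟩ := hgo nc true true m hm
      obtain ⟨e2, g2⟩ := hgo nc false true _ g1
      exact ⟨by rw [e1, e2], g2⟩
    · exact ⟨rfl, hm⟩
  · -- a finished, b active
    split_ifs with h
    · obtain ⟨e1, g1⟩ := hgo nc true true m hm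
      obtain ⟨e2, g2⟩ := hgo nc true false _ g1
      exact ⟨by rw [e1, e2], g2⟩
    · exact ⟨rfl, hm⟩
  · -- both finished
    split_ifs with h
    · obtain ⟨e1, g1⟩ := hgo nc true true m hm
      exact ⟨by rw [e1], g1⟩
    · exact ⟨rfl, hm⟩

lemma pvDpA_ok (s : List Char) :
    ∀ (rest : List Char) (idx carry : Int) (aD bD : Bool) (m : pvMemo),
      pvGoodM s m → 0 ≤ idx → rest = s.drop idx.toNat →
      (pvDpA rest idx carry aD bD m).1 = pvDpP rest carry aD bD ∧
        pvGoodM s (pvDpA rest idx carry aD bD m).2 := by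
  intro rest
  induction rest with
  | nil => intro idx carry aD bD m hm _ _; exact ⟨rfl, hm⟩
  | cons ch rs ih =>
    intro idx carry aD bD m hm hidx hdrop
    have hrs : rs = s.drop (idx + 1).toNat := by
      have h1 : (idx + 1).toNat = idx.toNat + 1 := by omega
      have h2 : s.drop (idx.toNat + 1) = List.drop 1 (List.drop idx.toNat s) := by
        rw [List.drop_drop]
      rw [h1, h2, ← hdrop]
      rfl
    have hgo : ∀ c a b m', pvGoodM s m' →
        (pvDpA rs (idx + 1) c a b m').1 = pvDpP rs c a b ∧
          pvGoodM s (pvDpA rs (idx + 1) c a b m').2 := by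
      intro c a b m' hm'
      exact ih (idx + 1) c a b m' hm' (by omega) hrs
    show (pvDpA (ch :: rs) idx carry aD bD m).1 = _ ∧ _
    rw [pvDpA]
    rcases hget : m.get? (idx, carry, aD, bD) with _ | v
    · simp only
      set t := (PySem.Int.ofChars? [ch]).getD 0 with ht
      obtain ⟨e0, g0⟩ := pvMemoBranch_ok s _ (pvDpP rs) hgo (t + 10 * 0 - carry) 0 aD bD m hm
      obtain ⟨e1, g1⟩ := pvMemoBranch_ok s _ (pvDpP rs) hgo (t + 10 * 1 - carry) 1 aD bD _ g0
      have hval : 0 + (pvMemoBranch (fun c a b m => pvDpA rs (idx + 1) c a b m)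
            (t + 10 * 0 - carry) 0 aD bD m).1 +
          (pvMemoBranch (fun c a b m => pvDpA rs (idx + 1) c a b m) (t + 10 * 1 - carry) 1 aD bD
            (pvMemoBranch (fun c a b m => pvDpA rs (idx + 1) c a b m)
              (t + 10 * 0 - carry) 0 aD bD m).2).1
          = pvDpP (ch :: rs) carry aD bD := by
        rw [e0, e1, pvDpP]
        show _ = pvStep t (pvDpP rs) carry aD bD
        rw [pvStep, pvCell_eq_pBranch, pvCell_eq_pBranch]
        ring
      refine ⟨hval, ?_⟩
      intro j c a b v hv
      by_cases hk : (j, c, a, b) = ((idx, carry, aD, bD) : Int × Int × Bool × Bool)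
      · rw [hk, PySem.Dict.get?_insert_self] at hv
        simp only [Prod.mk.injEq] at hk
        obtain ⟨hj, hc, ha, hb⟩ := hk
        subst hj; subst hc; subst ha; subst hb
        injection hv with hv
        rw [← hv, ← hdrop]
        exact hval
      · rw [PySem.Dict.get?_insert_of_ne _ _ hk] at hv
        exact g1 j c a b v hv
    · simp only
      refine ⟨?_, hm⟩
      have := hm idx carry aD bD v hget
      rw [this, ← hdrop]

theorem pv_foldr_eq_dpP (s : List Char) :
    s.foldr (fun ch layer => pvStep ((PySem.Int.ofChars? [ch]).getD 0) layer) pvBase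
      = pvDpP s := by
  induction s with
  | nil => rfl
  | cons ch rs ih => simp only [List.foldr, ih]; rfl

-- ===== VERDICT (by name: the statement is the Claim_ definition above) =====
theorem countNoZeroPairs_spec : Claim_equal_countNoZeroPairs := by
  intro n _ _
  unfold Spec_countNoZeroPairs countNoZeroPairs countNoZeroPairs_alt
  simp only
  rw [pv_foldr_eq_dpP]
  have hempty : pvGoodM ((PySem.Int.toChars n).reverse) PySem.Dict.empty := by
    intro j c a b v hv
    simp [PySem.Dict.get?, PySem.Dict.empty] at hv
  have := pvDpA_ok ((PySem.Int.toChars n).reverse) ((PySem.Int.toChars n).reverse)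
    0 0 false false PySem.Dict.empty hempty (by omega) (by rfl)
  exact this.1
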